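-- pv_equiv track=rewrite | github.com/0523kevin/review-python | codetest/programmer/level2/롤케이크.py | solution
-- ===== SOURCE A (Python) =====
-- from collections import Counter
-- from collections import deque, Counter
--
-- def solution(topping):
--     box = set()
--     cnt = Counter(topping)
--     dq = deque(topping)
--     answer = 0
--     for i in range(len(dq)):
--         n = dq.popleft()
--         box.add(n)
--         if len(box) == len(set(dq)):
--             answer += 1
--     return answer
-- ===== SOURCE B (Python) =====
-- from collections import Counter
--
-- def solution(topping):
--     cnt = Counter(topping)
--     rem = len(cnt)
--     seen = set()
--     answer = 0
--     for x in topping: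
--         cnt[x] -= 1
--         if cnt[x] == 0:
--             rem -= 1
--         seen.add(x)
--         if len(seen) == rem:
--             answer += 1
--     return answer
-- ===== Notes on version B (the rewrite author's own statement) =====
-- stated objective: faster
-- what changed: Instead of recomputing set(remaining) from scratch at every split position, B builds a Counter once and per element decrements it, tracking the number of distinct remaining values in O(1) per step.
import Mathlib
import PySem

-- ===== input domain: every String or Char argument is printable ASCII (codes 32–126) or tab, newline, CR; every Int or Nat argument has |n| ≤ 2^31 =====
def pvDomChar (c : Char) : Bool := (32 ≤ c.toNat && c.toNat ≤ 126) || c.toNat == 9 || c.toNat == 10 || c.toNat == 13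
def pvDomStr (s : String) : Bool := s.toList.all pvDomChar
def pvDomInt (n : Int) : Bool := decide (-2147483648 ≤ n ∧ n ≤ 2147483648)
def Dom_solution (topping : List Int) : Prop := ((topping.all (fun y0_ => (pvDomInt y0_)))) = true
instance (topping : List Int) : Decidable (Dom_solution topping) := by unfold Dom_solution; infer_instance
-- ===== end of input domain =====

-- B replaces A's per-step recomputation of set(remaining) (O(n^2)) by a decremented
-- multiplicity counter tracking the number of distinct remaining elements (O(n)).

-- ===== PORT A =====
-- A pops each element off the deque, adds it to `box`, and compares
-- len(box) with len(set(dq)) recomputed from the whole remaining deque.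
def solutionLoopA (box : PySem.Set Int) (dq : List Int) (answer : Int) : Int :=
  match dq with
  | [] => answer
  | n :: rest =>
    let box' := PySem.Set.add box n
    solutionLoopA box' rest
      (if box'.length = (PySem.Set.ofList rest).length then answer + 1 else answer)

def solution (topping : List Int) : Int :=
  solutionLoopA PySem.Set.empty topping 0

-- ===== PORT B =====
-- B: Counter decremented per element; `rem` tracks distinct values still remaining.
def solutionLoopB (cnt : PySem.Dict Int Int) (rem : Int) (seen : PySem.Set Int)
    (answer : Int) (rest : List Int) : Int :=
  match rest with
  | [] => answer
  | x :: xs =>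
    let cnt' := cnt.insert x (cnt.getD x 0 - 1)
    let rem' := if cnt'.getD x 0 = 0 then rem - 1 else rem
    let seen' := PySem.Set.add seen x
    solutionLoopB cnt' rem' seen'
      (if (seen'.length : Int) = rem' then answer + 1 else answer) xs

def solution_alt (topping : List Int) : Int :=
  let cnt := PySem.Dict.counter topping
  solutionLoopB cnt (cnt.size : Int) PySem.Set.empty 0 topping

-- ===== PRECONDITION & SPEC =====
def Spec_solution (topping : List Int) (out : Int) : Prop := out = solution_alt topping
instance (topping : List Int) (out : Int) : Decidable (Spec_solution topping out) := by unfold Spec_solution; infer_instance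

-- ===== CLAIM (what is proved, stated in full; the proofs are below) =====
def Claim_equal_solution : Prop := ∀ (topping : List Int), Dom_solution topping → Spec_solution topping (solution topping)

-- ===== LEMMAS AND PROOFS =====

-- Number of distinct elements of x :: xs, in terms of xs.
lemma len_ofList_cons (x : Int) (xs : List Int) :
    (PySem.Set.ofList (x :: xs)).length =
      if x ∈ xs then (PySem.Set.ofList xs).length else (PySem.Set.ofList xs).length + 1 := by
  rw [PySem.Set.ofList_cons]
  have hnd := PySem.Set.nodup_ofList (xs := xs)
  have hmem : x ∈ PySem.Set.ofList xs ↔ x ∈ xs := PySem.Set.mem_ofList _ _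
  by_cases hx : x ∈ xs
  · simp only [hx, if_true, List.length_cons]
    have hxs : x ∈ PySem.Set.ofList xs := hmem.mpr hx
    -- discard removes exactly the one occurrence of x
    have : (PySem.Set.discard (PySem.Set.ofList xs) x).length + 1
        = (PySem.Set.ofList xs).length := by
      unfold PySem.Set.discard
      rw [← List.countP_eq_length_filter]
      have hcount : (PySem.Set.ofList xs).count x = 1 :=
        List.count_eq_one_of_mem hnd hxs
      have hsplit := List.length_eq_countP_add_countP (l := PySem.Set.ofList xs)
        (p := fun y => !(y == x))
      have hc : (PySem.Set.ofList xs).countP (fun a => decide ¬((!(a == x)) = true)) =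
          (PySem.Set.ofList xs).count x := by
        simp [List.count]
        exact List.countP_congr (fun a _ => by simp)
      omega
    omega
  · simp only [hx, if_false, List.length_cons]
    have : PySem.Set.discard (PySem.Set.ofList xs) x = PySem.Set.ofList xs := by
      unfold PySem.Set.discard
      apply List.filter_eq_self.mpr
      intro y hy
      have hyxs : y ∈ xs := (PySem.Set.mem_ofList xs y).mp hy
      simp only [Bool.not_eq_eq_eq_not, Bool.not_true, beq_eq_false_iff_ne]
      intro h; exact hx (h ▸ hyxs)
    rw [this]

-- Main loop equivalence under the counter invariant.
lemma loop_eq (rest : List Int) :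
    ∀ (box : PySem.Set Int) (answer : Int) (cnt : PySem.Dict Int Int) (rem : Int),
    (∀ v, cnt.getD v 0 = (rest.count v : Int)) →
    rem = ((PySem.Set.ofList rest).length : Int) →
    solutionLoopA box rest answer = solutionLoopB cnt rem box answer rest := by
  induction rest with
  | nil => intro _ _ _ _ _ _; rfl
  | cons x xs ih =>
    intro box answer cnt rem hcnt hrem
    simp only [solutionLoopA, solutionLoopB]
    have hgx : (cnt.insert x (cnt.getD x 0 - 1)).getD x 0 = (xs.count x : Int) := by
      rw [PySem.Dict.getD_insert_self, hcnt x]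
      simp
    have hcnt' : ∀ v, (cnt.insert x (cnt.getD x 0 - 1)).getD v 0 = (xs.count v : Int) := by
      intro v
      by_cases hv : v = x
      · subst hv; exact hgx
      · rw [PySem.Dict.getD_insert_of_ne _ _ _ hv, hcnt v]
        simp [beq_iff_eq, Ne.symm hv]
    have hrem' : (if (cnt.insert x (cnt.getD x 0 - 1)).getD x 0 = 0 then rem - 1 else rem)
        = ((PySem.Set.ofList xs).length : Int) := by
      rw [hgx, hrem, len_ofList_cons]
      by_cases hx : x ∈ xs
      · have : xs.count x ≠ 0 := by
          simpa [List.count_eq_zero] using hx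
        simp [hx, this]
      · have : xs.count x = 0 := List.count_eq_zero.mpr hx
        simp [hx, this]
    rw [hrem']
    have hcond : ((PySem.Set.add box x).length = (PySem.Set.ofList xs).length)
        ↔ (((PySem.Set.add box x).length : Int) = ((PySem.Set.ofList xs).length : Int)) := by
      exact_mod_cast Iff.rfl
    rw [if_congr hcond rfl rfl]
    exact ih _ _ _ _ hcnt' rfl

-- ===== VERDICT (by name: the statement is the Claim_ definition above) =====
theorem solution_spec : Claim_equal_solution := by
  intro topping _
  unfold Spec_solution solution solution_alt
  apply loop_eq
  · intro v; exact PySem.Dict.getD_counter topping v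
  · have h : (PySem.Dict.counter topping).keys.length = (PySem.Set.ofList topping).length := by
      rw [PySem.Dict.keys_counter]
    simp only [PySem.Dict.size, PySem.Dict.keys, List.length_map] at h ⊢
    rw [h]
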